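-- pv_equiv track=rewrite | github.com/kvardijan/BusDriverSchedulium | BusDriverScheduling.py | nadi_prvi_slobodni_index
-- ===== SOURCE A (Python) =====
-- def nadi_prvi_slobodni_index(iskoristeni_indexi, parent1):
--     i = 0
--     for e in parent1:
--         iskoristeni = False
--         for i_x in iskoristeni_indexi:
--             if i == i_x:
--                 iskoristeni = True
--                 break
--         if iskoristeni:
--             i+=1
--         else:
--             return i
--     return -1
-- ===== SOURCE B (Python) =====
-- def nadi_prvi_slobodni_index(iskoristeni_indexi, parent1):
--     n = len(parent1)
--     used = sorted(x for x in iskoristeni_indexi if 0 <= x < n)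
--     expected = 0
--     for x in used:
--         if x == expected:
--             expected += 1
--         elif x > expected:
--             return expected
--         # x < expected: duplicate already counted, skip
--     return expected if expected < n else -1
-- ===== Notes on version B (the rewrite author's own statement) =====
-- stated objective: alternative
-- what changed: Replaces A's per-candidate inner membership scan (O(n*m)) with a sort of the in-range used indices followed by a single sweep with an 'expected' counter that finds the first gap (O(m log m + n)).
import Mathlib
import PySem

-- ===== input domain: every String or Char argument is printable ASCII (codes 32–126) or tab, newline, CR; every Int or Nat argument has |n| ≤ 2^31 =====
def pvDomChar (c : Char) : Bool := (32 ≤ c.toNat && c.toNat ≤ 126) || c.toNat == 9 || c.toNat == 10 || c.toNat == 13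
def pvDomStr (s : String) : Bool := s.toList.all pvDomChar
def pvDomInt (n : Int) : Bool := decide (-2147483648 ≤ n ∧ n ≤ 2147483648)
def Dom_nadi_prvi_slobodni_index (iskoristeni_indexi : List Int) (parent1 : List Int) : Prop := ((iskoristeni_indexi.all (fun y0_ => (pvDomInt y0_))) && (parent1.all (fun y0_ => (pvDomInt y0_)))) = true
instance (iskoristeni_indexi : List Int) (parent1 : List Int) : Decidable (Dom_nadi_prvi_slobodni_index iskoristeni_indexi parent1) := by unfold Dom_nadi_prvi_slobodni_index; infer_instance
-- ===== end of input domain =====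

-- B replaces A's per-candidate inner membership scan with sort-then-single-sweep (alternative decomposition).

-- ===== PORT A =====
-- inner 'for i_x in iskoristeni_indexi: if i == i_x: iskoristeni = True; break'
def pvMemScan (iskoristeni_indexi : List Int) (i : Int) : Bool :=
  match iskoristeni_indexi with
  | [] => false
  | i_x :: rest => if i == i_x then true else pvMemScan rest i

-- outer 'for e in parent1' loop with counter i
def pvLoopA (iskoristeni_indexi : List Int) : List Int → Int → Int
  | [], _ => -1
  | _ :: rest, i =>
    if pvMemScan iskoristeni_indexi i then pvLoopA iskoristeni_indexi rest (i + 1) else i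

def nadi_prvi_slobodni_index (iskoristeni_indexi : List Int) (parent1 : List Int) : Int :=
  pvLoopA iskoristeni_indexi parent1 0

-- ===== PORT B =====
-- 'for x in used' sweep with the 'expected' counter; the trailing return folded into the [] case
def pvSweep (n : Int) : List Int → Int → Int
  | [], expected => if expected < n then expected else -1
  | x :: xs, expected =>
    if x == expected then pvSweep n xs (expected + 1)
    else if x > expected then expected
    else pvSweep n xs expected

def nadi_prvi_slobodni_index_alt (iskoristeni_indexi : List Int) (parent1 : List Int) : Int :=
  let n : Int := parent1.length
  let used := PySem.List.sorted
      (iskoristeni_indexi.filter (fun x => decide (0 ≤ x) && decide (x < n)))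
      (fun x => x) false
  pvSweep n used 0

-- ===== PRECONDITION & SPEC =====
def Spec_nadi_prvi_slobodni_index (iskoristeni_indexi : List Int) (parent1 : List Int) (out : Int) : Prop := out = nadi_prvi_slobodni_index_alt iskoristeni_indexi parent1
instance (iskoristeni_indexi : List Int) (parent1 : List Int) (out : Int) : Decidable (Spec_nadi_prvi_slobodni_index iskoristeni_indexi parent1 out) := by unfold Spec_nadi_prvi_slobodni_index; infer_instance

-- ===== CLAIM (what is proved, stated in full; the proofs are below) =====
def Claim_equal_nadi_prvi_slobodni_index : Prop := ∀ (iskoristeni_indexi : List Int) (parent1 : List Int), Dom_nadi_prvi_slobodni_index iskoristeni_indexi parent1 → Spec_nadi_prvi_slobodni_index iskoristeni_indexi parent1 (nadi_prvi_slobodni_index iskoristeni_indexi parent1)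

-- ===== LEMMAS AND PROOFS =====

-- reference: scan i, i+1, …, i+m-1; return the first k with P k = false, else -1
def pvSpec (P : Int → Bool) : Nat → Int → Int
  | 0, _ => -1
  | m + 1, i => if P i then pvSpec P m (i + 1) else i

theorem pvMemScan_eq (u : List Int) (i : Int) : pvMemScan u i = u.contains i := by
  induction u with
  | nil => rfl
  | cons x xs ih =>
    simp [pvMemScan, ih]

theorem pvLoopA_eq_spec (u : List Int) (l : List Int) :
    ∀ i, pvLoopA u l i = pvSpec (fun k => pvMemScan u k) l.length i := by
  induction l with
  | nil => intro i; rfl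
  | cons a l ih =>
    intro i
    simp only [pvLoopA, List.length_cons, pvSpec, ih]

theorem pvSpec_congr (P Q : Int → Bool) :
    ∀ (m : Nat) (i : Int), (∀ k, i ≤ k → k < i + m → P k = Q k) →
      pvSpec P m i = pvSpec Q m i := by
  intro m
  induction m with
  | zero => intro i _; rfl
  | succ m ih =>
    intro i h
    have h0 : P i = Q i := h i le_rfl (by omega)
    simp only [pvSpec, h0]
    split
    · exact ih (i + 1) (fun k hk1 hk2 => h k (by omega) (by omega))
    · rfl

theorem pvSpec_false (m : Nat) (i : Int) :
    pvSpec (fun _ => false) m i = if 0 < m then i else -1 := by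
  cases m <;> simp [pvSpec]

theorem pvSweep_eq_spec (n : Int) (xs : List Int)
    (hs : xs.Pairwise (· ≤ ·)) (hlt : ∀ x ∈ xs, x < n) :
    ∀ e, e ≤ n → pvSweep n xs e = pvSpec (fun k => xs.contains k) (n - e).toNat e := by
  induction xs with
  | nil =>
    intro e he
    have : (fun k => ([] : List Int).contains k) = fun _ => false := by
      funext k; simp
    rw [this, pvSpec_false]
    simp only [pvSweep]
    split <;> rename_i h
    · rw [if_pos (by omega)]
    · rw [if_neg (by omega)]
  | cons x xs ih =>
    intro e he
    have hx : x < n := hlt x (by simp)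
    have hxle : ∀ y ∈ xs, x ≤ y := by
      intro y hy; exact (List.pairwise_cons.mp hs).1 y hy
    have hs' := (List.pairwise_cons.mp hs).2
    have hlt' : ∀ y ∈ xs, y < n := fun y hy => hlt y (List.mem_cons_of_mem _ hy)
    simp only [pvSweep]
    by_cases hxe : x = e
    · subst hxe
      rw [if_pos (by simp)]
      have hm : (n - x).toNat = (n - (x + 1)).toNat + 1 := by omega
      rw [hm]
      simp only [pvSpec]
      rw [if_pos (by simp)]
      rw [ih hs' hlt' (x + 1) (by omega)]
      apply pvSpec_congr
      intro k hk1 hk2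
      simp only [List.contains_cons]
      have : (k == x) = false := by simp; omega
      rw [this, Bool.false_or]
    · rw [if_neg (by simp [hxe])]
      by_cases hgt : x > e
      · rw [if_pos hgt]
        have hm : (n - e).toNat = (n - (e + 1)).toNat + 1 := by omega
        rw [hm]
        simp only [pvSpec]
        rw [if_neg (by
          simp
          exact ⟨by omega, fun hmem => by have := hxle e hmem; omega⟩)]
      · rw [if_neg hgt]
        rw [ih hs' hlt' e he]
        apply pvSpec_congr
        intro k hk1 hk2
        simp only [List.contains_cons]
        have : (k == x) = false := by simp; omega
        rw [this, Bool.false_or]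

-- ===== VERDICT (by name: the statement is the Claim_ definition above) =====
theorem nadi_prvi_slobodni_index_spec : Claim_equal_nadi_prvi_slobodni_index := by
  intro u p _
  unfold Spec_nadi_prvi_slobodni_index nadi_prvi_slobodni_index nadi_prvi_slobodni_index_alt
  set n : Int := (p.length : Int) with hn
  set used := PySem.List.sorted
      (u.filter (fun x => decide (0 ≤ x) && decide (x < n))) (fun x => x) false with hused
  have hpair : used.Pairwise (· ≤ ·) := by
    simpa using PySem.List.sorted_pairwise
      (u.filter (fun x => decide (0 ≤ x) && decide (x < n))) (fun x => x)
  have hmem : ∀ k, k ∈ used ↔ (k ∈ u ∧ 0 ≤ k ∧ k < n) := by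
    intro k
    rw [hused, PySem.List.mem_sorted, List.mem_filter]
    simp
  have hlt : ∀ x ∈ used, x < n := fun x hx => ((hmem x).mp hx).2.2
  rw [pvLoopA_eq_spec, pvSweep_eq_spec n used hpair hlt 0 (by omega)]
  have hfuel : ((n : Int) - 0).toNat = p.length := by omega
  rw [hfuel]
  apply pvSpec_congr
  intro k hk1 hk2
  rw [pvMemScan_eq]
  simp only [List.contains_eq_mem, decide_eq_decide]
  rw [hmem k]
  constructor
  · intro h; exact ⟨h, hk1, by rw [hn]; omega⟩
  · intro h; exact h.1
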